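-- pv_equiv track=rewrite | github.com/mahsanghani/Stock_Predictions | Email_Stocks.py | sort_tomorrow
-- ===== SOURCE A (Python) =====
-- def sort_tomorrow(stocks):
--     sorted = []
--     for stock in stocks:
--         if stock[4] == 'After Market Close':
--             sorted.append(stock)
--     for stock in stocks:
--         if stock[4] == 'Time Not Supplied':
--             sorted.append(stock)
--     return sorted
-- ===== SOURCE B (Python) =====
-- def sort_tomorrow(stocks):
--     after_close = []
--     not_supplied = []
--     for stock in stocks:
--         if stock[4] == 'After Market Close':
--             after_close.append(stock)
--         elif stock[4] == 'Time Not Supplied':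
--             not_supplied.append(stock)
--     return after_close + not_supplied
-- ===== Notes on version B (the rewrite author's own statement) =====
-- stated objective: alternative
-- what changed: Replaces A's two sequential scans of the list with a single pass maintaining two accumulator lists (after_close, not_supplied) that are concatenated at the end.
import Mathlib
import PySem

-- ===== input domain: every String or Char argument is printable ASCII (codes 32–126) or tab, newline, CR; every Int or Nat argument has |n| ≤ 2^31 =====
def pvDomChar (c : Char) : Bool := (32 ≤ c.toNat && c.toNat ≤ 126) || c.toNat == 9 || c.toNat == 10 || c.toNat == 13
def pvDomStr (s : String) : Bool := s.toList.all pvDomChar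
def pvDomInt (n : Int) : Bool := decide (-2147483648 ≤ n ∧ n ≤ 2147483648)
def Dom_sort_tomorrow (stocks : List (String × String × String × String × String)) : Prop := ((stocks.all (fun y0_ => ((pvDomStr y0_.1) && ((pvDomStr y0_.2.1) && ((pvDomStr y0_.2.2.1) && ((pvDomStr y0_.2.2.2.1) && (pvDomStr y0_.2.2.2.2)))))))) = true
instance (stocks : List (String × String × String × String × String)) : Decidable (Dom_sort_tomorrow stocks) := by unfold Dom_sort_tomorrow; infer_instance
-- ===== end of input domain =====

-- B makes one pass with two accumulator lists instead of A's two scans; same return value.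
-- ===== PORT A =====
def sort_tomorrow (stocks : List (String × String × String × String × String)) : List (String × String × String × String × String) :=
  let s1 := stocks.foldl (fun acc stock =>
    if stock.2.2.2.2 == "After Market Close" then acc ++ [stock] else acc) []
  let s2 := stocks.foldl (fun acc stock =>
    if stock.2.2.2.2 == "Time Not Supplied" then acc ++ [stock] else acc) s1
  s2

-- ===== PORT B =====
def sort_tomorrow_alt (stocks : List (String × String × String × String × String)) : List (String × String × String × String × String) :=
  let p := stocks.foldl (fun (acc : List (String × String × String × String × String) × List (String × String × String × String × String)) stock =>
    if stock.2.2.2.2 == "After Market Close" then (acc.1 ++ [stock], acc.2)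
    else if stock.2.2.2.2 == "Time Not Supplied" then (acc.1, acc.2 ++ [stock])
    else acc) ([], [])
  p.1 ++ p.2

-- ===== PRECONDITION & SPEC =====
def Spec_sort_tomorrow (stocks : List (String × String × String × String × String)) (out : List (String × String × String × String × String)) : Prop := out = sort_tomorrow_alt stocks
instance (stocks : List (String × String × String × String × String)) (out : List (String × String × String × String × String)) : Decidable (Spec_sort_tomorrow stocks out) := by unfold Spec_sort_tomorrow; infer_instance

-- ===== CLAIM (what is proved, stated in full; the proofs are below) =====
def Claim_equal_sort_tomorrow : Prop := ∀ (stocks : List (String × String × String × String × String)), Dom_sort_tomorrow stocks → Spec_sort_tomorrow stocks (sort_tomorrow stocks)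

-- ===== LEMMAS AND PROOFS =====

theorem fold_append_init {T : Type} (l : List T) (q : T → Bool) (a : List T) :
    l.foldl (fun acc stock => if q stock then acc ++ [stock] else acc) a
    = a ++ l.foldl (fun acc stock => if q stock then acc ++ [stock] else acc) [] := by
  induction l generalizing a with
  | nil => simp
  | cons x l ih =>
    simp only [List.foldl_cons]
    by_cases h : q x = true
    · rw [if_pos h, if_pos h, ih (a ++ [x]), ih ([] ++ [x])]
      simp
    · rw [if_neg h, if_neg h, ih a]

theorem pair_fold_eq {T : Type} (p q : T → Bool) (hpq : ∀ x, p x = true → q x = false)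
    (l : List T) (a b : List T) :
    l.foldl (fun (acc : List T × List T) stock =>
      if p stock then (acc.1 ++ [stock], acc.2)
      else if q stock then (acc.1, acc.2 ++ [stock])
      else acc) (a, b)
    = (l.foldl (fun acc stock => if p stock then acc ++ [stock] else acc) a,
       l.foldl (fun acc stock => if q stock then acc ++ [stock] else acc) b) := by
  induction l generalizing a b with
  | nil => rfl
  | cons x l ih =>
    simp only [List.foldl_cons]
    by_cases h1 : p x = true
    · rw [if_pos h1, if_pos h1, if_neg (by simp [hpq x h1])]
      exact ih (a ++ [x]) b
    · rw [if_neg h1, if_neg h1]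
      by_cases h2 : q x = true
      · rw [if_pos h2, if_pos h2]; exact ih a (b ++ [x])
      · rw [if_neg h2, if_neg h2]; exact ih a b

theorem pair_fold_eq_spec (l : List (String × String × String × String × String))
    (a b : List (String × String × String × String × String)) :
    l.foldl (fun (acc : List (String × String × String × String × String) × List (String × String × String × String × String)) stock =>
      if stock.2.2.2.2 == "After Market Close" then (acc.1 ++ [stock], acc.2)
      else if stock.2.2.2.2 == "Time Not Supplied" then (acc.1, acc.2 ++ [stock])
      else acc) (a, b)
    = (l.foldl (fun acc stock => if stock.2.2.2.2 == "After Market Close" then acc ++ [stock] else acc) a,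
       l.foldl (fun acc stock => if stock.2.2.2.2 == "Time Not Supplied" then acc ++ [stock] else acc) b) :=
  pair_fold_eq (fun stock => stock.2.2.2.2 == "After Market Close")
    (fun stock => stock.2.2.2.2 == "Time Not Supplied")
    (by intro x hx; simp only [beq_iff_eq] at hx ⊢; simp [hx]) l a b

-- ===== VERDICT (by name: the statement is the Claim_ definition above) =====
theorem sort_tomorrow_spec : Claim_equal_sort_tomorrow := by
  intro stocks _
  unfold Spec_sort_tomorrow sort_tomorrow sort_tomorrow_alt
  simp only []
  rw [pair_fold_eq_spec]
  exact fold_append_init stocks (fun stock => stock.2.2.2.2 == "Time Not Supplied") _
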